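-- pv_equiv track=rewrite | github.com/dadosjusbr/coletores | mprn/src/crawler.py | links_remuneration
-- ===== SOURCE A (Python) =====
-- baseURL = "http://transparencia.mprn.mp.br/Arquivos/C0007/"
--
-- def links_remuneration(month, year):
--     # A formação do link possui um código referente a cada mês
--     cod_2018 = {
--         '1': "21203",
--         '2': "21323",
--         '3': "21398",
--         '4': "22561",
--         '5': "23763",
--         '6': "23897",
--         '7': "24080",
--         '8': "24198",
--         '9': "24344",
--         '10': "25526",
--         '11': "27659",
--         '12': "29710",
--     }
--
--     cod_2019 = {
--         '1': "30860",
--         '2': "31960",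
--         '3': "34312",
--         '4': "34491",
--         '5': "34618",
--         '6': "35780",
--         '7': "36832",
--         '8': "37994",
--         '9': "38166",
--         '10': "39353",
--         '11': "40516",
--         '12': "41799",
--     }
--
--     cod_2020 = {
--         '1': "41800",
--         '2': "41849",
--         '3': "41918",
--         '4': "42095",
--         '5': "42174",
--         '6': "42299",
--         '7': "43434",
--         '8': "43558",
--         '9': "43645",
--         '10': "44741",
--         '11': "45874",
--         '12': "47869",
--     }
--     cod_2021 = {
--         '1': "48049",
--         '2': "48235",
--         '3': "48344",
--         '4': "48525",
--         '5': "48664",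
--         '6': "48786",
--         '7': "48905",
--         '8': "",
--         '9': "",
--         '10': "",
--         '11': "",
--         '12': "",
--     }
--     links_type = {}
--     link = ""
--     if year == "2018":
--         for key in cod_2018:
--
--             if month.zfill(2) == key.zfill(2):
--                 link = baseURL + year + '/R0082/' + cod_2018[key] + '.ods'
--                 links_type["Membros ativos"] = link
--
--     elif year == "2019":
--         for key in cod_2019:
--             if month.zfill(2) == key.zfill(2):
--                 link = baseURL + year + '/R0082/' + cod_2019[key] + '.ods'
--                 links_type["Membros ativos"] = link
--
--     elif year == "2020":
--         for key in cod_2020: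
--             if month.zfill(2) == key.zfill(2):
--                 link = baseURL + year + '/R0082/' + cod_2020[key] + '.ods'
--                 links_type["Membros ativos"] = link
--
--     elif year == "2021":
--         for key in cod_2021:
--             if month.zfill(2) == key.zfill(2):
--                 link = baseURL + year + '/R0082/' + cod_2021[key] + '.ods'
--                 links_type["Membros ativos"] = link
--
--     return links_type
-- ===== SOURCE B (Python) =====
-- baseURL = "http://transparencia.mprn.mp.br/Arquivos/C0007/"
--
-- # one flat list of the 48 month codes, row-major by year (2018..2021), Jan..Dec
-- _CODS = [
--     "21203", "21323", "21398", "22561", "23763", "23897",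
--     "24080", "24198", "24344", "25526", "27659", "29710",
--     "30860", "31960", "34312", "34491", "34618", "35780",
--     "36832", "37994", "38166", "39353", "40516", "41799",
--     "41800", "41849", "41918", "42095", "42174", "42299",
--     "43434", "43558", "43645", "44741", "45874", "47869",
--     "48049", "48235", "48344", "48525", "48664", "48786",
--     "48905", "", "", "", "", "",
-- ]
--
--
-- def links_remuneration(month, year):
--     # validate the month format arithmetically instead of scanning key dicts:
--     # after zero-padding it must be exactly two digits with value 1..12
--     m = month.zfill(2)
--     if len(m) != 2 or not m.isdigit():
--         return {}
--     mi = int(m)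
--     if not (1 <= mi <= 12):
--         return {}
--     if year not in ("2018", "2019", "2020", "2021"):
--         return {}
--     cod = _CODS[(int(year) - 2018) * 12 + (mi - 1)]
--     return {"Membros ativos": baseURL + year + '/R0082/' + cod + '.ods'}
-- ===== Notes on version B (the rewrite author's own statement) =====
-- stated objective: alternative
-- what changed: Instead of four per-year dict literals scanned key-by-key with zfill comparisons under an if/elif chain, B validates the zero-padded month arithmetically (two digits, value 1..12), converts month and year to integers, and indexes a single flat 48-entry code list by the computed offset (int(year)-2018)*12 + (int(m)-1).
import Mathlib
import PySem

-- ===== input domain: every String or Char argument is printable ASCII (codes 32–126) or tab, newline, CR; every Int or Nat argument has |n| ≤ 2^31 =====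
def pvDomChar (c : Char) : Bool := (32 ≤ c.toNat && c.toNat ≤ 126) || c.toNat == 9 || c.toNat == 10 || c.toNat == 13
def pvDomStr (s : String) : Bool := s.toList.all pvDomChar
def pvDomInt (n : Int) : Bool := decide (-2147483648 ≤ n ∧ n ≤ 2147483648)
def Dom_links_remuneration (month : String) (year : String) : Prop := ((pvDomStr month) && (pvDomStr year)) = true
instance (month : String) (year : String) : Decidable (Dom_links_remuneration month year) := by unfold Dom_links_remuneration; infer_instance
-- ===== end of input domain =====

-- B drops A's four per-year dicts and scan loops: it validates the zero-padded month arithmetically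
-- (two digits, value 1..12) and indexes ONE flat 48-entry code list by (int(year)-2018)*12 + (int(m)-1).

def baseURL : String := "http://transparencia.mprn.mp.br/Arquivos/C0007/"

-- ===== PORT A =====
def cod_2018 : List (String × String) :=
  [("1", "21203"), ("2", "21323"), ("3", "21398"), ("4", "22561"), ("5", "23763"), ("6", "23897"),
   ("7", "24080"), ("8", "24198"), ("9", "24344"), ("10", "25526"), ("11", "27659"), ("12", "29710")]
def cod_2019 : List (String × String) :=
  [("1", "30860"), ("2", "31960"), ("3", "34312"), ("4", "34491"), ("5", "34618"), ("6", "35780"),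
   ("7", "36832"), ("8", "37994"), ("9", "38166"), ("10", "39353"), ("11", "40516"), ("12", "41799")]
def cod_2020 : List (String × String) :=
  [("1", "41800"), ("2", "41849"), ("3", "41918"), ("4", "42095"), ("5", "42174"), ("6", "42299"),
   ("7", "43434"), ("8", "43558"), ("9", "43645"), ("10", "44741"), ("11", "45874"), ("12", "47869")]
def cod_2021 : List (String × String) :=
  [("1", "48049"), ("2", "48235"), ("3", "48344"), ("4", "48525"), ("5", "48664"), ("6", "48786"),
   ("7", "48905"), ("8", ""), ("9", ""), ("10", ""), ("11", ""), ("12", "")]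

-- the loop body shared by the four branches of A (state = (link, links_type))
def pvLoopA (month : String) (year : String) (cod : List (String × String)) :
    String × PySem.Dict String String → String × PySem.Dict String String :=
  fun st => cod.foldl
    (fun st kv =>
      if PySem.Str.zfill month 2 = PySem.Str.zfill kv.1 2 then
        let link := baseURL ++ year ++ "/R0082/" ++ kv.2 ++ ".ods"
        (link, st.2.insert "Membros ativos" link)
      else st) st

def links_remuneration (month : String) (year : String) : List (String × String) :=
  let links_type : PySem.Dict String String := PySem.Dict.empty
  let link : String := ""
  if year = "2018" then (pvLoopA month year cod_2018 (link, links_type)).2.items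
  else if year = "2019" then (pvLoopA month year cod_2019 (link, links_type)).2.items
  else if year = "2020" then (pvLoopA month year cod_2020 (link, links_type)).2.items
  else if year = "2021" then (pvLoopA month year cod_2021 (link, links_type)).2.items
  else links_type.items

-- ===== PORT B =====
-- one flat list of the 48 month codes, row-major by year (2018..2021), Jan..Dec
def pvCOD : List String :=
  ["21203", "21323", "21398", "22561", "23763", "23897",
   "24080", "24198", "24344", "25526", "27659", "29710",
   "30860", "31960", "34312", "34491", "34618", "35780",
   "36832", "37994", "38166", "39353", "40516", "41799",
   "41800", "41849", "41918", "42095", "42174", "42299",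
   "43434", "43558", "43645", "44741", "45874", "47869",
   "48049", "48235", "48344", "48525", "48664", "48786",
   "48905", "", "", "", "", ""]

-- the body of Source B after `m = month.zfill(2)` (the early returns become nested ifs)
def pvAltCore (m : String) (year : String) : List (String × String) :=
  if PySem.Str.len m = 2 ∧ PySem.Str.strIsdigit m = true then
    match PySem.Int.ofStr? m with          -- mi = int(m); never a ValueError: m.isdigit() holds
    | none => []
    | some mi =>
      if 1 ≤ mi ∧ mi ≤ 12 then
        if year = "2018" ∨ year = "2019" ∨ year = "2020" ∨ year = "2021" then
          match PySem.Int.ofStr? year with -- int(year); never a ValueError: year is a digit literal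
          | none => []
          | some yi =>
            match PySem.List.pyGet? pvCOD ((yi - 2018) * 12 + (mi - 1)) with
            | none => []                   -- never an IndexError: the index is in 0..47
            | some cod => [("Membros ativos", baseURL ++ year ++ "/R0082/" ++ cod ++ ".ods")]
        else []
      else []
  else []

def links_remuneration_alt (month : String) (year : String) : List (String × String) :=
  pvAltCore (PySem.Str.zfill month 2) year

-- ===== PRECONDITION & SPEC =====
def Spec_links_remuneration (month : String) (year : String) (out : List (String × String)) : Prop := out = links_remuneration_alt month year
instance (month : String) (year : String) (out : List (String × String)) : Decidable (Spec_links_remuneration month year out) := by unfold Spec_links_remuneration; infer_instance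

-- ===== CLAIM (what is proved, stated in full; the proofs are below) =====
def Claim_equal_links_remuneration : Prop := ∀ (month : String) (year : String), Dom_links_remuneration month year → Spec_links_remuneration month year (links_remuneration month year)

-- ===== LEMMAS AND PROOFS =====

theorem pvCharEq {c : Char} {n : Nat} (h : c.toNat = n) (d : Char) (hd : d.toNat = n) : c = d := by
  apply Char.ext
  apply UInt32.toBitVec_inj.mp
  apply BitVec.eq_of_toNat_eq
  show c.toNat = d.toNat
  omega

theorem pvDigitCases (c : Char) (h : PySem.Chars.isdigit c = true) :
    c = '0' ∨ c = '1' ∨ c = '2' ∨ c = '3' ∨ c = '4' ∨ c = '5' ∨ c = '6' ∨ c = '7' ∨ c = '8' ∨ c = '9' := by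
  simp [PySem.Chars.isdigit, Char.le_def, UInt32.le_iff_toBitVec_le, BitVec.le_def] at h
  have h1 : 48 ≤ c.toNat := h.1
  have h2 : c.toNat ≤ 57 := h.2
  interval_cases hn : c.toNat
  · exact Or.inl (pvCharEq hn '0' (by decide))
  · exact Or.inr (Or.inl (pvCharEq hn '1' (by decide)))
  · exact Or.inr (Or.inr (Or.inl (pvCharEq hn '2' (by decide))))
  · exact Or.inr (Or.inr (Or.inr (Or.inl (pvCharEq hn '3' (by decide)))))
  · exact Or.inr (Or.inr (Or.inr (Or.inr (Or.inl (pvCharEq hn '4' (by decide))))))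
  · exact Or.inr (Or.inr (Or.inr (Or.inr (Or.inr (Or.inl (pvCharEq hn '5' (by decide)))))))
  · exact Or.inr (Or.inr (Or.inr (Or.inr (Or.inr (Or.inr (Or.inl (pvCharEq hn '6' (by decide))))))))
  · exact Or.inr (Or.inr (Or.inr (Or.inr (Or.inr (Or.inr (Or.inr (Or.inl (pvCharEq hn '7' (by decide)))))))))
  · exact Or.inr (Or.inr (Or.inr (Or.inr (Or.inr (Or.inr (Or.inr (Or.inr (Or.inl (pvCharEq hn '8' (by decide))))))))))
  · exact Or.inr (Or.inr (Or.inr (Or.inr (Or.inr (Or.inr (Or.inr (Or.inr (Or.inr (pvCharEq hn '9' (by decide))))))))))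

theorem pvMonthEnum (z : String) (hlen : z.toList.length = 2)
    (hd : PySem.Str.strIsdigit z = true) (v : Int)
    (hv : PySem.Int.ofStr? z = some v) (h1 : 1 ≤ v) (h12 : v ≤ 12) :
    z = "01" ∨ z = "02" ∨ z = "03" ∨ z = "04" ∨ z = "05" ∨ z = "06" ∨
    z = "07" ∨ z = "08" ∨ z = "09" ∨ z = "10" ∨ z = "11" ∨ z = "12" := by
  obtain ⟨a, b, hz⟩ : ∃ a b, z.toList = [a, b] := by
    cases hzl : z.toList with
    | nil => simp [hzl] at hlen
    | cons a t => cases t with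
      | nil => simp [hzl] at hlen
      | cons b u => cases u with
        | nil => exact ⟨a, b, rfl⟩
        | cons c w => simp [hzl] at hlen
  have hda : PySem.Chars.isdigit a = true ∧ PySem.Chars.isdigit b = true := by
    have := hd
    rw [PySem.Str.strIsdigit_eq, hz] at this
    simpa [PySem.Chars.strIsdigit] using this
  rcases pvDigitCases a hda.1 with rfl | rfl | rfl | rfl | rfl | rfl | rfl | rfl | rfl | rfl <;>
    rcases pvDigitCases b hda.2 with rfl | rfl | rfl | rfl | rfl | rfl | rfl | rfl | rfl | rfl
  · exfalso
    have hz2 : z = "00" := String.toList_inj.mp (by rw [hz]; decide)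
    subst hz2
    rw [show PySem.Int.ofStr? "00" = some 0 from by decide] at hv
    injection hv with hq
    omega
  · have hz2 : z = "01" := String.toList_inj.mp (by rw [hz]; decide)
    subst hz2; tauto
  · have hz2 : z = "02" := String.toList_inj.mp (by rw [hz]; decide)
    subst hz2; tauto
  · have hz2 : z = "03" := String.toList_inj.mp (by rw [hz]; decide)
    subst hz2; tauto
  · have hz2 : z = "04" := String.toList_inj.mp (by rw [hz]; decide)
    subst hz2; tauto
  · have hz2 : z = "05" := String.toList_inj.mp (by rw [hz]; decide)
    subst hz2; tauto
  · have hz2 : z = "06" := String.toList_inj.mp (by rw [hz]; decide)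
    subst hz2; tauto
  · have hz2 : z = "07" := String.toList_inj.mp (by rw [hz]; decide)
    subst hz2; tauto
  · have hz2 : z = "08" := String.toList_inj.mp (by rw [hz]; decide)
    subst hz2; tauto
  · have hz2 : z = "09" := String.toList_inj.mp (by rw [hz]; decide)
    subst hz2; tauto
  · have hz2 : z = "10" := String.toList_inj.mp (by rw [hz]; decide)
    subst hz2; tauto
  · have hz2 : z = "11" := String.toList_inj.mp (by rw [hz]; decide)
    subst hz2; tauto
  · have hz2 : z = "12" := String.toList_inj.mp (by rw [hz]; decide)
    subst hz2; tauto
  · exfalso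
    have hz2 : z = "13" := String.toList_inj.mp (by rw [hz]; decide)
    subst hz2
    rw [show PySem.Int.ofStr? "13" = some 13 from by decide] at hv
    injection hv with hq
    omega
  · exfalso
    have hz2 : z = "14" := String.toList_inj.mp (by rw [hz]; decide)
    subst hz2
    rw [show PySem.Int.ofStr? "14" = some 14 from by decide] at hv
    injection hv with hq
    omega
  · exfalso
    have hz2 : z = "15" := String.toList_inj.mp (by rw [hz]; decide)
    subst hz2
    rw [show PySem.Int.ofStr? "15" = some 15 from by decide] at hv
    injection hv with hq
    omega
  · exfalso
    have hz2 : z = "16" := String.toList_inj.mp (by rw [hz]; decide)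
    subst hz2
    rw [show PySem.Int.ofStr? "16" = some 16 from by decide] at hv
    injection hv with hq
    omega
  · exfalso
    have hz2 : z = "17" := String.toList_inj.mp (by rw [hz]; decide)
    subst hz2
    rw [show PySem.Int.ofStr? "17" = some 17 from by decide] at hv
    injection hv with hq
    omega
  · exfalso
    have hz2 : z = "18" := String.toList_inj.mp (by rw [hz]; decide)
    subst hz2
    rw [show PySem.Int.ofStr? "18" = some 18 from by decide] at hv
    injection hv with hq
    omega
  · exfalso
    have hz2 : z = "19" := String.toList_inj.mp (by rw [hz]; decide)
    subst hz2
    rw [show PySem.Int.ofStr? "19" = some 19 from by decide] at hv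
    injection hv with hq
    omega
  · exfalso
    have hz2 : z = "20" := String.toList_inj.mp (by rw [hz]; decide)
    subst hz2
    rw [show PySem.Int.ofStr? "20" = some 20 from by decide] at hv
    injection hv with hq
    omega
  · exfalso
    have hz2 : z = "21" := String.toList_inj.mp (by rw [hz]; decide)
    subst hz2
    rw [show PySem.Int.ofStr? "21" = some 21 from by decide] at hv
    injection hv with hq
    omega
  · exfalso
    have hz2 : z = "22" := String.toList_inj.mp (by rw [hz]; decide)
    subst hz2
    rw [show PySem.Int.ofStr? "22" = some 22 from by decide] at hv
    injection hv with hq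
    omega
  · exfalso
    have hz2 : z = "23" := String.toList_inj.mp (by rw [hz]; decide)
    subst hz2
    rw [show PySem.Int.ofStr? "23" = some 23 from by decide] at hv
    injection hv with hq
    omega
  · exfalso
    have hz2 : z = "24" := String.toList_inj.mp (by rw [hz]; decide)
    subst hz2
    rw [show PySem.Int.ofStr? "24" = some 24 from by decide] at hv
    injection hv with hq
    omega
  · exfalso
    have hz2 : z = "25" := String.toList_inj.mp (by rw [hz]; decide)
    subst hz2
    rw [show PySem.Int.ofStr? "25" = some 25 from by decide] at hv
    injection hv with hq
    omega
  · exfalso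
    have hz2 : z = "26" := String.toList_inj.mp (by rw [hz]; decide)
    subst hz2
    rw [show PySem.Int.ofStr? "26" = some 26 from by decide] at hv
    injection hv with hq
    omega
  · exfalso
    have hz2 : z = "27" := String.toList_inj.mp (by rw [hz]; decide)
    subst hz2
    rw [show PySem.Int.ofStr? "27" = some 27 from by decide] at hv
    injection hv with hq
    omega
  · exfalso
    have hz2 : z = "28" := String.toList_inj.mp (by rw [hz]; decide)
    subst hz2
    rw [show PySem.Int.ofStr? "28" = some 28 from by decide] at hv
    injection hv with hq
    omega
  · exfalso
    have hz2 : z = "29" := String.toList_inj.mp (by rw [hz]; decide)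
    subst hz2
    rw [show PySem.Int.ofStr? "29" = some 29 from by decide] at hv
    injection hv with hq
    omega
  · exfalso
    have hz2 : z = "30" := String.toList_inj.mp (by rw [hz]; decide)
    subst hz2
    rw [show PySem.Int.ofStr? "30" = some 30 from by decide] at hv
    injection hv with hq
    omega
  · exfalso
    have hz2 : z = "31" := String.toList_inj.mp (by rw [hz]; decide)
    subst hz2
    rw [show PySem.Int.ofStr? "31" = some 31 from by decide] at hv
    injection hv with hq
    omega
  · exfalso
    have hz2 : z = "32" := String.toList_inj.mp (by rw [hz]; decide)
    subst hz2
    rw [show PySem.Int.ofStr? "32" = some 32 from by decide] at hv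
    injection hv with hq
    omega
  · exfalso
    have hz2 : z = "33" := String.toList_inj.mp (by rw [hz]; decide)
    subst hz2
    rw [show PySem.Int.ofStr? "33" = some 33 from by decide] at hv
    injection hv with hq
    omega
  · exfalso
    have hz2 : z = "34" := String.toList_inj.mp (by rw [hz]; decide)
    subst hz2
    rw [show PySem.Int.ofStr? "34" = some 34 from by decide] at hv
    injection hv with hq
    omega
  · exfalso
    have hz2 : z = "35" := String.toList_inj.mp (by rw [hz]; decide)
    subst hz2
    rw [show PySem.Int.ofStr? "35" = some 35 from by decide] at hv
    injection hv with hq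
    omega
  · exfalso
    have hz2 : z = "36" := String.toList_inj.mp (by rw [hz]; decide)
    subst hz2
    rw [show PySem.Int.ofStr? "36" = some 36 from by decide] at hv
    injection hv with hq
    omega
  · exfalso
    have hz2 : z = "37" := String.toList_inj.mp (by rw [hz]; decide)
    subst hz2
    rw [show PySem.Int.ofStr? "37" = some 37 from by decide] at hv
    injection hv with hq
    omega
  · exfalso
    have hz2 : z = "38" := String.toList_inj.mp (by rw [hz]; decide)
    subst hz2
    rw [show PySem.Int.ofStr? "38" = some 38 from by decide] at hv
    injection hv with hq
    omega
  · exfalso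
    have hz2 : z = "39" := String.toList_inj.mp (by rw [hz]; decide)
    subst hz2
    rw [show PySem.Int.ofStr? "39" = some 39 from by decide] at hv
    injection hv with hq
    omega
  · exfalso
    have hz2 : z = "40" := String.toList_inj.mp (by rw [hz]; decide)
    subst hz2
    rw [show PySem.Int.ofStr? "40" = some 40 from by decide] at hv
    injection hv with hq
    omega
  · exfalso
    have hz2 : z = "41" := String.toList_inj.mp (by rw [hz]; decide)
    subst hz2
    rw [show PySem.Int.ofStr? "41" = some 41 from by decide] at hv
    injection hv with hq
    omega
  · exfalso
    have hz2 : z = "42" := String.toList_inj.mp (by rw [hz]; decide)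
    subst hz2
    rw [show PySem.Int.ofStr? "42" = some 42 from by decide] at hv
    injection hv with hq
    omega
  · exfalso
    have hz2 : z = "43" := String.toList_inj.mp (by rw [hz]; decide)
    subst hz2
    rw [show PySem.Int.ofStr? "43" = some 43 from by decide] at hv
    injection hv with hq
    omega
  · exfalso
    have hz2 : z = "44" := String.toList_inj.mp (by rw [hz]; decide)
    subst hz2
    rw [show PySem.Int.ofStr? "44" = some 44 from by decide] at hv
    injection hv with hq
    omega
  · exfalso
    have hz2 : z = "45" := String.toList_inj.mp (by rw [hz]; decide)
    subst hz2
    rw [show PySem.Int.ofStr? "45" = some 45 from by decide] at hv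
    injection hv with hq
    omega
  · exfalso
    have hz2 : z = "46" := String.toList_inj.mp (by rw [hz]; decide)
    subst hz2
    rw [show PySem.Int.ofStr? "46" = some 46 from by decide] at hv
    injection hv with hq
    omega
  · exfalso
    have hz2 : z = "47" := String.toList_inj.mp (by rw [hz]; decide)
    subst hz2
    rw [show PySem.Int.ofStr? "47" = some 47 from by decide] at hv
    injection hv with hq
    omega
  · exfalso
    have hz2 : z = "48" := String.toList_inj.mp (by rw [hz]; decide)
    subst hz2
    rw [show PySem.Int.ofStr? "48" = some 48 from by decide] at hv
    injection hv with hq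
    omega
  · exfalso
    have hz2 : z = "49" := String.toList_inj.mp (by rw [hz]; decide)
    subst hz2
    rw [show PySem.Int.ofStr? "49" = some 49 from by decide] at hv
    injection hv with hq
    omega
  · exfalso
    have hz2 : z = "50" := String.toList_inj.mp (by rw [hz]; decide)
    subst hz2
    rw [show PySem.Int.ofStr? "50" = some 50 from by decide] at hv
    injection hv with hq
    omega
  · exfalso
    have hz2 : z = "51" := String.toList_inj.mp (by rw [hz]; decide)
    subst hz2
    rw [show PySem.Int.ofStr? "51" = some 51 from by decide] at hv
    injection hv with hq
    omega
  · exfalso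
    have hz2 : z = "52" := String.toList_inj.mp (by rw [hz]; decide)
    subst hz2
    rw [show PySem.Int.ofStr? "52" = some 52 from by decide] at hv
    injection hv with hq
    omega
  · exfalso
    have hz2 : z = "53" := String.toList_inj.mp (by rw [hz]; decide)
    subst hz2
    rw [show PySem.Int.ofStr? "53" = some 53 from by decide] at hv
    injection hv with hq
    omega
  · exfalso
    have hz2 : z = "54" := String.toList_inj.mp (by rw [hz]; decide)
    subst hz2
    rw [show PySem.Int.ofStr? "54" = some 54 from by decide] at hv
    injection hv with hq
    omega
  · exfalso
    have hz2 : z = "55" := String.toList_inj.mp (by rw [hz]; decide)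
    subst hz2
    rw [show PySem.Int.ofStr? "55" = some 55 from by decide] at hv
    injection hv with hq
    omega
  · exfalso
    have hz2 : z = "56" := String.toList_inj.mp (by rw [hz]; decide)
    subst hz2
    rw [show PySem.Int.ofStr? "56" = some 56 from by decide] at hv
    injection hv with hq
    omega
  · exfalso
    have hz2 : z = "57" := String.toList_inj.mp (by rw [hz]; decide)
    subst hz2
    rw [show PySem.Int.ofStr? "57" = some 57 from by decide] at hv
    injection hv with hq
    omega
  · exfalso
    have hz2 : z = "58" := String.toList_inj.mp (by rw [hz]; decide)
    subst hz2
    rw [show PySem.Int.ofStr? "58" = some 58 from by decide] at hv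
    injection hv with hq
    omega
  · exfalso
    have hz2 : z = "59" := String.toList_inj.mp (by rw [hz]; decide)
    subst hz2
    rw [show PySem.Int.ofStr? "59" = some 59 from by decide] at hv
    injection hv with hq
    omega
  · exfalso
    have hz2 : z = "60" := String.toList_inj.mp (by rw [hz]; decide)
    subst hz2
    rw [show PySem.Int.ofStr? "60" = some 60 from by decide] at hv
    injection hv with hq
    omega
  · exfalso
    have hz2 : z = "61" := String.toList_inj.mp (by rw [hz]; decide)
    subst hz2
    rw [show PySem.Int.ofStr? "61" = some 61 from by decide] at hv
    injection hv with hq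
    omega
  · exfalso
    have hz2 : z = "62" := String.toList_inj.mp (by rw [hz]; decide)
    subst hz2
    rw [show PySem.Int.ofStr? "62" = some 62 from by decide] at hv
    injection hv with hq
    omega
  · exfalso
    have hz2 : z = "63" := String.toList_inj.mp (by rw [hz]; decide)
    subst hz2
    rw [show PySem.Int.ofStr? "63" = some 63 from by decide] at hv
    injection hv with hq
    omega
  · exfalso
    have hz2 : z = "64" := String.toList_inj.mp (by rw [hz]; decide)
    subst hz2
    rw [show PySem.Int.ofStr? "64" = some 64 from by decide] at hv
    injection hv with hq
    omega
  · exfalso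
    have hz2 : z = "65" := String.toList_inj.mp (by rw [hz]; decide)
    subst hz2
    rw [show PySem.Int.ofStr? "65" = some 65 from by decide] at hv
    injection hv with hq
    omega
  · exfalso
    have hz2 : z = "66" := String.toList_inj.mp (by rw [hz]; decide)
    subst hz2
    rw [show PySem.Int.ofStr? "66" = some 66 from by decide] at hv
    injection hv with hq
    omega
  · exfalso
    have hz2 : z = "67" := String.toList_inj.mp (by rw [hz]; decide)
    subst hz2
    rw [show PySem.Int.ofStr? "67" = some 67 from by decide] at hv
    injection hv with hq
    omega
  · exfalso
    have hz2 : z = "68" := String.toList_inj.mp (by rw [hz]; decide)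
    subst hz2
    rw [show PySem.Int.ofStr? "68" = some 68 from by decide] at hv
    injection hv with hq
    omega
  · exfalso
    have hz2 : z = "69" := String.toList_inj.mp (by rw [hz]; decide)
    subst hz2
    rw [show PySem.Int.ofStr? "69" = some 69 from by decide] at hv
    injection hv with hq
    omega
  · exfalso
    have hz2 : z = "70" := String.toList_inj.mp (by rw [hz]; decide)
    subst hz2
    rw [show PySem.Int.ofStr? "70" = some 70 from by decide] at hv
    injection hv with hq
    omega
  · exfalso
    have hz2 : z = "71" := String.toList_inj.mp (by rw [hz]; decide)
    subst hz2
    rw [show PySem.Int.ofStr? "71" = some 71 from by decide] at hv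
    injection hv with hq
    omega
  · exfalso
    have hz2 : z = "72" := String.toList_inj.mp (by rw [hz]; decide)
    subst hz2
    rw [show PySem.Int.ofStr? "72" = some 72 from by decide] at hv
    injection hv with hq
    omega
  · exfalso
    have hz2 : z = "73" := String.toList_inj.mp (by rw [hz]; decide)
    subst hz2
    rw [show PySem.Int.ofStr? "73" = some 73 from by decide] at hv
    injection hv with hq
    omega
  · exfalso
    have hz2 : z = "74" := String.toList_inj.mp (by rw [hz]; decide)
    subst hz2
    rw [show PySem.Int.ofStr? "74" = some 74 from by decide] at hv
    injection hv with hq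
    omega
  · exfalso
    have hz2 : z = "75" := String.toList_inj.mp (by rw [hz]; decide)
    subst hz2
    rw [show PySem.Int.ofStr? "75" = some 75 from by decide] at hv
    injection hv with hq
    omega
  · exfalso
    have hz2 : z = "76" := String.toList_inj.mp (by rw [hz]; decide)
    subst hz2
    rw [show PySem.Int.ofStr? "76" = some 76 from by decide] at hv
    injection hv with hq
    omega
  · exfalso
    have hz2 : z = "77" := String.toList_inj.mp (by rw [hz]; decide)
    subst hz2
    rw [show PySem.Int.ofStr? "77" = some 77 from by decide] at hv
    injection hv with hq
    omega
  · exfalso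
    have hz2 : z = "78" := String.toList_inj.mp (by rw [hz]; decide)
    subst hz2
    rw [show PySem.Int.ofStr? "78" = some 78 from by decide] at hv
    injection hv with hq
    omega
  · exfalso
    have hz2 : z = "79" := String.toList_inj.mp (by rw [hz]; decide)
    subst hz2
    rw [show PySem.Int.ofStr? "79" = some 79 from by decide] at hv
    injection hv with hq
    omega
  · exfalso
    have hz2 : z = "80" := String.toList_inj.mp (by rw [hz]; decide)
    subst hz2
    rw [show PySem.Int.ofStr? "80" = some 80 from by decide] at hv
    injection hv with hq
    omega
  · exfalso
    have hz2 : z = "81" := String.toList_inj.mp (by rw [hz]; decide)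
    subst hz2
    rw [show PySem.Int.ofStr? "81" = some 81 from by decide] at hv
    injection hv with hq
    omega
  · exfalso
    have hz2 : z = "82" := String.toList_inj.mp (by rw [hz]; decide)
    subst hz2
    rw [show PySem.Int.ofStr? "82" = some 82 from by decide] at hv
    injection hv with hq
    omega
  · exfalso
    have hz2 : z = "83" := String.toList_inj.mp (by rw [hz]; decide)
    subst hz2
    rw [show PySem.Int.ofStr? "83" = some 83 from by decide] at hv
    injection hv with hq
    omega
  · exfalso
    have hz2 : z = "84" := String.toList_inj.mp (by rw [hz]; decide)
    subst hz2
    rw [show PySem.Int.ofStr? "84" = some 84 from by decide] at hv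
    injection hv with hq
    omega
  · exfalso
    have hz2 : z = "85" := String.toList_inj.mp (by rw [hz]; decide)
    subst hz2
    rw [show PySem.Int.ofStr? "85" = some 85 from by decide] at hv
    injection hv with hq
    omega
  · exfalso
    have hz2 : z = "86" := String.toList_inj.mp (by rw [hz]; decide)
    subst hz2
    rw [show PySem.Int.ofStr? "86" = some 86 from by decide] at hv
    injection hv with hq
    omega
  · exfalso
    have hz2 : z = "87" := String.toList_inj.mp (by rw [hz]; decide)
    subst hz2
    rw [show PySem.Int.ofStr? "87" = some 87 from by decide] at hv
    injection hv with hq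
    omega
  · exfalso
    have hz2 : z = "88" := String.toList_inj.mp (by rw [hz]; decide)
    subst hz2
    rw [show PySem.Int.ofStr? "88" = some 88 from by decide] at hv
    injection hv with hq
    omega
  · exfalso
    have hz2 : z = "89" := String.toList_inj.mp (by rw [hz]; decide)
    subst hz2
    rw [show PySem.Int.ofStr? "89" = some 89 from by decide] at hv
    injection hv with hq
    omega
  · exfalso
    have hz2 : z = "90" := String.toList_inj.mp (by rw [hz]; decide)
    subst hz2
    rw [show PySem.Int.ofStr? "90" = some 90 from by decide] at hv
    injection hv with hq
    omega
  · exfalso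
    have hz2 : z = "91" := String.toList_inj.mp (by rw [hz]; decide)
    subst hz2
    rw [show PySem.Int.ofStr? "91" = some 91 from by decide] at hv
    injection hv with hq
    omega
  · exfalso
    have hz2 : z = "92" := String.toList_inj.mp (by rw [hz]; decide)
    subst hz2
    rw [show PySem.Int.ofStr? "92" = some 92 from by decide] at hv
    injection hv with hq
    omega
  · exfalso
    have hz2 : z = "93" := String.toList_inj.mp (by rw [hz]; decide)
    subst hz2
    rw [show PySem.Int.ofStr? "93" = some 93 from by decide] at hv
    injection hv with hq
    omega
  · exfalso
    have hz2 : z = "94" := String.toList_inj.mp (by rw [hz]; decide)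
    subst hz2
    rw [show PySem.Int.ofStr? "94" = some 94 from by decide] at hv
    injection hv with hq
    omega
  · exfalso
    have hz2 : z = "95" := String.toList_inj.mp (by rw [hz]; decide)
    subst hz2
    rw [show PySem.Int.ofStr? "95" = some 95 from by decide] at hv
    injection hv with hq
    omega
  · exfalso
    have hz2 : z = "96" := String.toList_inj.mp (by rw [hz]; decide)
    subst hz2
    rw [show PySem.Int.ofStr? "96" = some 96 from by decide] at hv
    injection hv with hq
    omega
  · exfalso
    have hz2 : z = "97" := String.toList_inj.mp (by rw [hz]; decide)
    subst hz2
    rw [show PySem.Int.ofStr? "97" = some 97 from by decide] at hv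
    injection hv with hq
    omega
  · exfalso
    have hz2 : z = "98" := String.toList_inj.mp (by rw [hz]; decide)
    subst hz2
    rw [show PySem.Int.ofStr? "98" = some 98 from by decide] at hv
    injection hv with hq
    omega
  · exfalso
    have hz2 : z = "99" := String.toList_inj.mp (by rw [hz]; decide)
    subst hz2
    rw [show PySem.Int.ofStr? "99" = some 99 from by decide] at hv
    injection hv with hq
    omega


-- a zero-padded month passing B's arithmetic guards cannot be anything but the 12 literals
theorem pvAltNilMonth (z : String) (year : String)
    (h : ¬ (z = "01" ∨ z = "02" ∨ z = "03" ∨ z = "04" ∨ z = "05" ∨ z = "06" ∨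
            z = "07" ∨ z = "08" ∨ z = "09" ∨ z = "10" ∨ z = "11" ∨ z = "12")) :
    pvAltCore z year = [] := by
  unfold pvAltCore
  by_cases hg : PySem.Str.len z = 2 ∧ PySem.Str.strIsdigit z = true
  · rw [if_pos hg]
    cases hmi : PySem.Int.ofStr? z with
    | none => rfl
    | some mi =>
      by_cases hb : 1 ≤ mi ∧ mi ≤ 12
      · exfalso
        apply h
        have hlen2 : z.toList.length = 2 := by
          have hl := hg.1
          simp [PySem.Str.len] at hl
          exact_mod_cast String.length_toList ▸ hl
        exact pvMonthEnum z hlen2 hg.2 mi hmi hb.1 hb.2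
      · dsimp only; rw [if_neg hb]
  · rw [if_neg hg]

theorem pvAltNilYear (z : String) (year : String) (h18 : year ≠ "2018") (h19 : year ≠ "2019")
    (h20 : year ≠ "2020") (h21 : year ≠ "2021") :
    pvAltCore z year = [] := by
  unfold pvAltCore
  by_cases hg : PySem.Str.len z = 2 ∧ PySem.Str.strIsdigit z = true
  · rw [if_pos hg]
    cases hmi : PySem.Int.ofStr? z with
    | none => rfl
    | some mi =>
      by_cases hb : 1 ≤ mi ∧ mi ≤ 12
      · dsimp only; rw [if_pos hb, if_neg (by simp [h18, h19, h20, h21])]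
      · dsimp only; rw [if_neg hb]
  · rw [if_neg hg]

theorem pvZfill_1 : PySem.Str.zfill "1" 2 = "01" := by decide
theorem pvZfill_2 : PySem.Str.zfill "2" 2 = "02" := by decide
theorem pvZfill_3 : PySem.Str.zfill "3" 2 = "03" := by decide
theorem pvZfill_4 : PySem.Str.zfill "4" 2 = "04" := by decide
theorem pvZfill_5 : PySem.Str.zfill "5" 2 = "05" := by decide
theorem pvZfill_6 : PySem.Str.zfill "6" 2 = "06" := by decide
theorem pvZfill_7 : PySem.Str.zfill "7" 2 = "07" := by decide
theorem pvZfill_8 : PySem.Str.zfill "8" 2 = "08" := by decide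
theorem pvZfill_9 : PySem.Str.zfill "9" 2 = "09" := by decide
theorem pvZfill_10 : PySem.Str.zfill "10" 2 = "10" := by decide
theorem pvZfill_11 : PySem.Str.zfill "11" 2 = "11" := by decide
theorem pvZfill_12 : PySem.Str.zfill "12" 2 = "12" := by decide

theorem pvCase2018 (month : String) :
    links_remuneration month "2018" = links_remuneration_alt month "2018" := by
  simp only [links_remuneration, links_remuneration_alt, pvLoopA]
  generalize hz : PySem.Str.zfill month 2 = z
  by_cases h1 : z = "01"; · subst h1; decide
  by_cases h2 : z = "02"; · subst h2; decide
  by_cases h3 : z = "03"; · subst h3; decide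
  by_cases h4 : z = "04"; · subst h4; decide
  by_cases h5 : z = "05"; · subst h5; decide
  by_cases h6 : z = "06"; · subst h6; decide
  by_cases h7 : z = "07"; · subst h7; decide
  by_cases h8 : z = "08"; · subst h8; decide
  by_cases h9 : z = "09"; · subst h9; decide
  by_cases h10 : z = "10"; · subst h10; decide
  by_cases h11 : z = "11"; · subst h11; decide
  by_cases h12 : z = "12"; · subst h12; decide
  rw [pvAltNilMonth z "2018" (by tauto)]
  simp only [cod_2018, List.foldl, pvZfill_1, pvZfill_2, pvZfill_3, pvZfill_4, pvZfill_5,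
    pvZfill_6, pvZfill_7, pvZfill_8, pvZfill_9, pvZfill_10, pvZfill_11, pvZfill_12,
    if_neg h1, if_neg h2, if_neg h3, if_neg h4, if_neg h5, if_neg h6,
    if_neg h7, if_neg h8, if_neg h9, if_neg h10, if_neg h11, if_neg h12]
  simp only [reduceIte]
  rfl

theorem pvCase2019 (month : String) :
    links_remuneration month "2019" = links_remuneration_alt month "2019" := by
  simp only [links_remuneration, links_remuneration_alt, pvLoopA]
  generalize hz : PySem.Str.zfill month 2 = z
  by_cases h1 : z = "01"; · subst h1; decide
  by_cases h2 : z = "02"; · subst h2; decide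
  by_cases h3 : z = "03"; · subst h3; decide
  by_cases h4 : z = "04"; · subst h4; decide
  by_cases h5 : z = "05"; · subst h5; decide
  by_cases h6 : z = "06"; · subst h6; decide
  by_cases h7 : z = "07"; · subst h7; decide
  by_cases h8 : z = "08"; · subst h8; decide
  by_cases h9 : z = "09"; · subst h9; decide
  by_cases h10 : z = "10"; · subst h10; decide
  by_cases h11 : z = "11"; · subst h11; decide
  by_cases h12 : z = "12"; · subst h12; decide
  rw [pvAltNilMonth z "2019" (by tauto)]
  simp only [cod_2019, List.foldl, pvZfill_1, pvZfill_2, pvZfill_3, pvZfill_4, pvZfill_5,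
    pvZfill_6, pvZfill_7, pvZfill_8, pvZfill_9, pvZfill_10, pvZfill_11, pvZfill_12,
    if_neg h1, if_neg h2, if_neg h3, if_neg h4, if_neg h5, if_neg h6,
    if_neg h7, if_neg h8, if_neg h9, if_neg h10, if_neg h11, if_neg h12]
  simp only [reduceIte]
  rfl

theorem pvCase2020 (month : String) :
    links_remuneration month "2020" = links_remuneration_alt month "2020" := by
  simp only [links_remuneration, links_remuneration_alt, pvLoopA]
  generalize hz : PySem.Str.zfill month 2 = z
  by_cases h1 : z = "01"; · subst h1; decide
  by_cases h2 : z = "02"; · subst h2; decide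
  by_cases h3 : z = "03"; · subst h3; decide
  by_cases h4 : z = "04"; · subst h4; decide
  by_cases h5 : z = "05"; · subst h5; decide
  by_cases h6 : z = "06"; · subst h6; decide
  by_cases h7 : z = "07"; · subst h7; decide
  by_cases h8 : z = "08"; · subst h8; decide
  by_cases h9 : z = "09"; · subst h9; decide
  by_cases h10 : z = "10"; · subst h10; decide
  by_cases h11 : z = "11"; · subst h11; decide
  by_cases h12 : z = "12"; · subst h12; decide
  rw [pvAltNilMonth z "2020" (by tauto)]
  simp only [cod_2020, List.foldl, pvZfill_1, pvZfill_2, pvZfill_3, pvZfill_4, pvZfill_5,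
    pvZfill_6, pvZfill_7, pvZfill_8, pvZfill_9, pvZfill_10, pvZfill_11, pvZfill_12,
    if_neg h1, if_neg h2, if_neg h3, if_neg h4, if_neg h5, if_neg h6,
    if_neg h7, if_neg h8, if_neg h9, if_neg h10, if_neg h11, if_neg h12]
  simp only [reduceIte]
  rfl

theorem pvCase2021 (month : String) :
    links_remuneration month "2021" = links_remuneration_alt month "2021" := by
  simp only [links_remuneration, links_remuneration_alt, pvLoopA]
  generalize hz : PySem.Str.zfill month 2 = z
  by_cases h1 : z = "01"; · subst h1; decide
  by_cases h2 : z = "02"; · subst h2; decide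
  by_cases h3 : z = "03"; · subst h3; decide
  by_cases h4 : z = "04"; · subst h4; decide
  by_cases h5 : z = "05"; · subst h5; decide
  by_cases h6 : z = "06"; · subst h6; decide
  by_cases h7 : z = "07"; · subst h7; decide
  by_cases h8 : z = "08"; · subst h8; decide
  by_cases h9 : z = "09"; · subst h9; decide
  by_cases h10 : z = "10"; · subst h10; decide
  by_cases h11 : z = "11"; · subst h11; decide
  by_cases h12 : z = "12"; · subst h12; decide
  rw [pvAltNilMonth z "2021" (by tauto)]
  simp only [cod_2021, List.foldl, pvZfill_1, pvZfill_2, pvZfill_3, pvZfill_4, pvZfill_5,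
    pvZfill_6, pvZfill_7, pvZfill_8, pvZfill_9, pvZfill_10, pvZfill_11, pvZfill_12,
    if_neg h1, if_neg h2, if_neg h3, if_neg h4, if_neg h5, if_neg h6,
    if_neg h7, if_neg h8, if_neg h9, if_neg h10, if_neg h11, if_neg h12]
  simp only [reduceIte]
  rfl

theorem pvCaseOther (month year : String) (h18 : year ≠ "2018") (h19 : year ≠ "2019")
    (h20 : year ≠ "2020") (h21 : year ≠ "2021") :
    links_remuneration month year = links_remuneration_alt month year := by
  simp only [links_remuneration, links_remuneration_alt]
  rw [if_neg h18, if_neg h19, if_neg h20, if_neg h21, pvAltNilYear _ year h18 h19 h20 h21]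
  rfl

-- ===== VERDICT (by name: the statement is the Claim_ definition above) =====
theorem links_remuneration_spec : Claim_equal_links_remuneration := by
  intro month year _
  unfold Spec_links_remuneration
  by_cases h18 : year = "2018"; · subst h18; exact pvCase2018 month
  by_cases h19 : year = "2019"; · subst h19; exact pvCase2019 month
  by_cases h20 : year = "2020"; · subst h20; exact pvCase2020 month
  by_cases h21 : year = "2021"; · subst h21; exact pvCase2021 month
  exact pvCaseOther month year h18 h19 h20 h21
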